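-- pv_equiv track=rewrite | github.com/the-vampiire/hacktoberithms | beginner/sum-of-all-numbers_dsargento.py | sum_all
-- ===== SOURCE A (Python) =====
-- def sum_all(num_list):
--     num_list = sorted(num_list)
--     diff = num_list[1] - num_list[0]
--     count = 0
--     while diff > num_list[0] and diff > 0:
--         count += diff
--         diff -= 1
--     return num_list[0] + num_list[1] + count
-- ===== SOURCE B (Python) =====
-- def sum_all(num_list):
--     # one pass to find the two smallest elements, then a closed-form
--     # triangular-number formula instead of the decrementing loop
--     m1 = m2 = None
--     for x in num_list:
--         if m1 is None or x < m1:
--             m2 = m1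
--             m1 = x
--         elif m2 is None or x < m2:
--             m2 = x
--     d = m2 - m1
--     lo = m1 if m1 > 0 else 0
--     count = (d * (d + 1)) // 2 - (lo * (lo + 1)) // 2 if d > lo else 0
--     return m1 + m2 + count
-- ===== Notes on version B (the rewrite author's own statement) =====
-- stated objective: alternative
-- what changed: replaces the sort with a single pass tracking the two smallest elements and replaces the decrementing while-loop with a closed-form difference of triangular numbers
import Mathlib
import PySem

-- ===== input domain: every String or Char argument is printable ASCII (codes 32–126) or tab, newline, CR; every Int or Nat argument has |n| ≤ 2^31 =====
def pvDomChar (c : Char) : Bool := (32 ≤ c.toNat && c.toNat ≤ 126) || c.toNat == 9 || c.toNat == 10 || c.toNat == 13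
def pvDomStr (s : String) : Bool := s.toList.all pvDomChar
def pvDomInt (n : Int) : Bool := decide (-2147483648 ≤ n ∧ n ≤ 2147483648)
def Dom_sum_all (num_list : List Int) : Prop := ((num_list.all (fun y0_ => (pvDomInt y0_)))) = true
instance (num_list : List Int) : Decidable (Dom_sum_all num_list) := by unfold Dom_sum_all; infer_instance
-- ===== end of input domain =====

-- B replaces A's sort + decrementing while-loop by a single two-minima pass and a
-- closed-form triangular-number formula (objective: alternative).

-- ===== PORT A =====
-- the while-loop: `while diff > a and diff > 0: count += diff; diff -= 1`
def sumAllLoop (a : Int) (diff : Int) (count : Int) : Int :=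
  if diff > a ∧ diff > 0 then sumAllLoop a (diff - 1) (count + diff) else count
termination_by diff.toNat
decreasing_by omega

def sum_all (num_list : List Int) : Int :=
  let s := PySem.List.sorted num_list (fun x => x) false
  match PySem.List.pyGet? s 0, PySem.List.pyGet? s 1 with
  | some a, some b => a + b + sumAllLoop a (b - a) 0
  | _, _ => 0  -- unreachable under Pre_ (Python raises IndexError)

-- ===== PORT B =====
-- loop body of B's single pass over the list
def twoMinStep (st : Option Int × Option Int) (x : Int) : Option Int × Option Int :=
  match st with
  | (none, m2) => (some x, m2)
  | (some m1, m2) =>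
    if x < m1 then (some x, some m1)
    else match m2 with
         | none => (some m1, some x)
         | some m2v => if x < m2v then (some m1, some x) else (some m1, some m2v)

def sum_all_alt (num_list : List Int) : Int :=
  let st := num_list.foldl twoMinStep (none, none)
  match st.1 with
  | none => 0  -- unreachable under Pre_ (Python raises TypeError)
  | some m1 =>
    match st.2 with
    | none => 0  -- unreachable under Pre_ (Python raises TypeError)
    | some m2 =>
      let d := m2 - m1
      let lo := if m1 > 0 then m1 else 0
      let count := if d > lo then
          PySem.Int.floordiv (d * (d + 1)) 2 - PySem.Int.floordiv (lo * (lo + 1)) 2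
        else 0
      m1 + m2 + count

-- ===== PRECONDITION & SPEC =====
-- A raises IndexError (and B a TypeError) when the list has fewer than two elements.
def Pre_sum_all (num_list : List Int) : Prop := 2 ≤ num_list.length
instance (num_list : List Int) : Decidable (Pre_sum_all num_list) := by unfold Pre_sum_all; infer_instance
def pvWitness_sum_all : List Int := [3, 1, 7]

def Spec_sum_all (num_list : List Int) (out : Int) : Prop := out = sum_all_alt num_list
instance (num_list : List Int) (out : Int) : Decidable (Spec_sum_all num_list out) := by unfold Spec_sum_all; infer_instance

-- ===== CLAIM (what is proved, stated in full; the proofs are below) =====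
def Claim_equal_sum_all : Prop := ∀ (num_list : List Int), Dom_sum_all num_list → Pre_sum_all num_list → Spec_sum_all num_list (sum_all num_list)

-- ===== LEMMAS AND PROOFS =====

-- closed form of the loop: summing d, d-1, … down to max a 0 + 1
theorem sumAllLoop_closed (a d c : Int) :
    sumAllLoop a d c =
      c + (if d > max a 0 then (d * (d + 1)) / 2 - (max a 0 * (max a 0 + 1)) / 2 else 0) := by
  rw [sumAllLoop]
  by_cases h : d > a ∧ d > 0
  · rw [if_pos h, sumAllLoop_closed a (d - 1) (c + d)]
    have e1 : (d - 1) * (d - 1 + 1) = d * (d + 1) - 2 * d := by ring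
    obtain ⟨k, hk⟩ : ∃ k, d * (d + 1) = k + k := Int.even_mul_succ_self d
    obtain ⟨j, hj⟩ : ∃ j, max a 0 * (max a 0 + 1) = j + j := Int.even_mul_succ_self (max a 0)
    rw [e1, hk, hj]
    have hm : d > max a 0 := by omega
    rw [if_pos hm]
    have s1 : (k + k) / 2 = k := by omega
    have s2 : (j + j) / 2 = j := by omega
    have s3 : (k + k - 2 * d) / 2 = k - d := by omega
    rw [s1, s2, s3]
    by_cases h3 : d - 1 > max a 0
    · rw [if_pos h3]; ring
    · rw [if_neg h3]
      have hm1 : max a 0 = d - 1 := by omega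
      have l1 : j + j = k + k - 2 * d := by
        calc j + j = max a 0 * (max a 0 + 1) := hj.symm
          _ = d * (d + 1) - 2 * d := by rw [hm1]; ring
          _ = k + k - 2 * d := by rw [hk]
      omega
  · rw [if_neg h]
    have h2 : ¬ d > max a 0 := by omega
    rw [if_neg h2]; omega
termination_by d.toNat
decreasing_by omega

-- fold invariant: after processing l from state (m1, m2) with leftovers r
theorem twoMin_inv (l : List Int) (m1 m2 : Int) (r : List Int)
    (h1 : m1 ≤ m2) (h2 : ∀ y ∈ r, m2 ≤ y) :
    ∃ m1' m2' r', l.foldl twoMinStep (some m1, some m2) = (some m1', some m2') ∧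
      m1' ≤ m2' ∧ (∀ y ∈ r', m2' ≤ y) ∧ (m1 :: m2 :: (r ++ l)).Perm (m1' :: m2' :: r') := by
  induction l generalizing m1 m2 r with
  | nil => exact ⟨m1, m2, r, rfl, h1, h2, by simp⟩
  | cons x l ih =>
    simp only [List.foldl_cons]
    by_cases hx1 : x < m1
    · obtain ⟨m1', m2', r', hf, ha, hb, hp⟩ :=
        ih x m1 (m2 :: r) (le_of_lt hx1)
          (by intro y hy; rcases List.mem_cons.mp hy with h | h
              · omega
              · exact le_trans h1 (h2 y h))
      refine ⟨m1', m2', r', ?_, ha, hb, ?_⟩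
      · simpa [twoMinStep, hx1] using hf
      · refine List.Perm.trans ?_ hp
        rw [← Multiset.coe_eq_coe]
        simp only [← Multiset.cons_coe, ← Multiset.coe_add, ← Multiset.singleton_add]
        abel
    · by_cases hx2 : x < m2
      · obtain ⟨m1', m2', r', hf, ha, hb, hp⟩ :=
          ih m1 x (m2 :: r) (by omega)
            (by intro y hy; rcases List.mem_cons.mp hy with h | h
                · omega
                · exact le_trans (le_of_lt hx2) (h2 y h))
        refine ⟨m1', m2', r', ?_, ha, hb, ?_⟩
        · simpa [twoMinStep, hx1, hx2] using hf
        · refine List.Perm.trans ?_ hp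
          rw [← Multiset.coe_eq_coe]
          simp only [← Multiset.cons_coe, ← Multiset.coe_add, ← Multiset.singleton_add]
          abel
      · obtain ⟨m1', m2', r', hf, ha, hb, hp⟩ :=
          ih m1 m2 (x :: r) h1
            (by intro y hy; rcases List.mem_cons.mp hy with h | h
                · omega
                · exact h2 y h)
        refine ⟨m1', m2', r', ?_, ha, hb, ?_⟩
        · simpa [twoMinStep, hx1, hx2] using hf
        · refine List.Perm.trans ?_ hp
          rw [← Multiset.coe_eq_coe]
          simp only [← Multiset.cons_coe, ← Multiset.coe_add, ← Multiset.singleton_add]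
          abel

theorem twoMin_spec (x y : Int) (t : List Int) :
    ∃ m1 m2 r, (x :: y :: t).foldl twoMinStep (none, none) = (some m1, some m2) ∧
      m1 ≤ m2 ∧ (∀ z ∈ r, m2 ≤ z) ∧ (x :: y :: t).Perm (m1 :: m2 :: r) := by
  simp only [List.foldl_cons]
  by_cases hxy : y < x
  · have hstep : twoMinStep (twoMinStep (none, none) x) y = (some y, some x) := by
      simp [twoMinStep, hxy]
    rw [hstep]
    obtain ⟨m1', m2', r', hf, ha, hb, hp⟩ :=
      twoMin_inv t y x [] (le_of_lt hxy) (by simp)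
    refine ⟨m1', m2', r', hf, ha, hb, List.Perm.trans ?_ (by simpa using hp)⟩
    exact List.Perm.swap y x t
  · have hstep : twoMinStep (twoMinStep (none, none) x) y = (some x, some y) := by
      simp [twoMinStep, hxy]
    rw [hstep]
    obtain ⟨m1', m2', r', hf, ha, hb, hp⟩ :=
      twoMin_inv t x y [] (by omega) (by simp)
    exact ⟨m1', m2', r', hf, ha, hb, by simpa using hp⟩

-- ===== VERDICT (by name: the statement is the Claim_ definition above) =====
theorem sum_all_spec : Claim_equal_sum_all := by
  intro l _ hpre
  unfold Pre_sum_all at hpre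
  unfold Spec_sum_all
  obtain _ | ⟨x, _ | ⟨y, t⟩⟩ := l
  · simp at hpre
  · simp at hpre
  -- B side
  obtain ⟨m1, m2, r, hfold, hm12, hmr, hpB⟩ := twoMin_spec x y t
  -- A side: name the sorted list
  have hlen : (PySem.List.sorted (x :: y :: t) (fun x => x) false).length = t.length + 2 := by
    rw [PySem.List.length_sorted]; simp
  obtain ⟨a, b, t', hs⟩ : ∃ a b t',
      PySem.List.sorted (x :: y :: t) (fun x => x) false = a :: b :: t' := by
    rcases hEq : PySem.List.sorted (x :: y :: t) (fun x => x) false with _ | ⟨a, _ | ⟨b, t'⟩⟩ <;>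
      rw [hEq] at hlen <;> simp at hlen
    exact ⟨a, b, t', rfl⟩
  have hperm : (a :: b :: t').Perm (x :: y :: t) := hs ▸ PySem.List.sorted_perm ..
  have hpair := PySem.List.sorted_pairwise (xs := x :: y :: t) (key := fun x => x)
  rw [hs, List.pairwise_cons] at hpair
  obtain ⟨hab, hpair2⟩ := hpair
  rw [List.pairwise_cons] at hpair2
  obtain ⟨hbt, _⟩ := hpair2
  -- the two head pairs coincide
  have hperm2 : (a :: b :: t').Perm (m1 :: m2 :: r) := hperm.trans hpB
  have ha : a = m1 := by
    have h1 : a ≤ m1 := by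
      have hm : m1 ∈ a :: b :: t' := hperm2.symm.subset (by simp)
      rcases List.mem_cons.mp hm with h | h
      · omega
      · exact hab m1 h
    have h2 : m1 ≤ a := by
      have hm : a ∈ m1 :: m2 :: r := hperm2.subset (by simp)
      rcases List.mem_cons.mp hm with h | h
      · omega
      · rcases List.mem_cons.mp h with h' | h'
        · omega
        · exact le_trans (le_trans hm12 (hmr a h')) (le_refl a)
    omega
  have hperm3 : (b :: t').Perm (m2 :: r) := by
    apply List.Perm.cons_inv (a := a)
    rw [ha] at hperm2 ⊢
    exact hperm2
  have hb : b = m2 := by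
    have h1 : b ≤ m2 := by
      have hm : m2 ∈ b :: t' := hperm3.symm.subset (by simp)
      rcases List.mem_cons.mp hm with h | h
      · omega
      · exact hbt m2 h
    have h2 : m2 ≤ b := by
      have hm : b ∈ m2 :: r := hperm3.subset (by simp)
      rcases List.mem_cons.mp hm with h | h
      · omega
      · exact hmr b h
    omega
  -- evaluate both ports and compare the closed forms
  have hget0 : PySem.List.pyGet? (a :: b :: t') 0 = some a := by
    simp [PySem.List.pyGet?, PySem.List.pyIdx?]
    rw [if_pos (by positivity)]
    simp
  have hget1 : PySem.List.pyGet? (a :: b :: t') 1 = some b := by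
    simp [PySem.List.pyGet?, PySem.List.pyIdx?]
  simp only [sum_all, sum_all_alt, hs, hfold, hget0, hget1]
  rw [sumAllLoop_closed, ha, hb,
      PySem.Int.floordiv_eq_ediv_of_pos (by norm_num),
      PySem.Int.floordiv_eq_ediv_of_pos (by norm_num)]
  have hlo : (if m1 > 0 then m1 else 0) = max m1 0 := by split_ifs <;> omega
  rw [hlo]
  ring
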